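-- pv_equiv track=rewrite | github.com/cursiveinc/python | recorder/reconstructor.py | process_key_events
-- ===== SOURCE A (Python) =====
-- def process_key_events(events):
--     """
--     Process keydown events to extract text, handling backspaces and other special keys.
--     """
--     text = []
--     for event in events:
--         key = event.get('key', '')
--
--         # Handle backspace
--         if key == 'BACKSPACE':
--             if text:
--                 text.pop()  # Remove the last character
--         # Add other characters
--         else:
--             text.append(key)
--
--     return ''.join(text)
-- ===== SOURCE B (Python) =====
-- def process_key_events(events):
--     # Two staged passes with a boolean survival mask: extract keys, then walk
--     # indices from last to first with a pending-backspace counter marking which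
--     # keys survive, and finally join the surviving keys in forward order.
--     keys = [e.get('key', '') for e in events]
--     n = len(keys)
--     keep = [False] * n
--     skip = 0
--     for i in range(n - 1, -1, -1):
--         if keys[i] == 'BACKSPACE':
--             skip += 1
--         elif skip:
--             skip -= 1
--         else:
--             keep[i] = True
--     return ''.join(keys[i] for i in range(n) if keep[i])
-- ===== Notes on version B (the rewrite author's own statement) =====
-- stated objective: alternative
-- what changed: Replaces the forward stack with pops by staged passes: extract the key list, compute a boolean survival mask in one backward scan with a pending-backspace counter, then join the surviving keys.
import Mathlib
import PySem

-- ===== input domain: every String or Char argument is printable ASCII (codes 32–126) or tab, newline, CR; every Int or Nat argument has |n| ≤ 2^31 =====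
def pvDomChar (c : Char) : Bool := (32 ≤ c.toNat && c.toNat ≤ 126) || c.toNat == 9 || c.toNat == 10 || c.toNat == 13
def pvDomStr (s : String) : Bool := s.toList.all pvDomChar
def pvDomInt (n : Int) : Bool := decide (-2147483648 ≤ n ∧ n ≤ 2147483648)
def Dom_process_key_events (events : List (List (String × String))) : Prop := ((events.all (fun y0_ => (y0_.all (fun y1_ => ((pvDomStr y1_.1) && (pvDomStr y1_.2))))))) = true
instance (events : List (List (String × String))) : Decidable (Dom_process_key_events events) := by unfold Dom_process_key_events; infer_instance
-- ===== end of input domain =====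

-- B replaces A's forward stack with pops by staged passes: extract the key list, mark which
-- keys survive in one backward scan with a pending-backspace counter, join the survivors.

-- ===== PORT A =====
-- one forward step of A's loop: pop on BACKSPACE (if nonempty), else append the key
def pkeStepA (text : List String) (event : List (String × String)) : List String :=
  let key := (PySem.Dict.mk event).getD "key" ""
  if key == "BACKSPACE" then
    if text.isEmpty then text else text.dropLast
  else
    text ++ [key]

def process_key_events (events : List (List (String × String))) : String :=
  PySem.Str.join "" (events.foldl pkeStepA [])

-- ===== PORT B =====
-- B's backward index loop over `keys`: walking i from n-1 down to 0 is structural foldr;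
-- consing onto the mask built for the tail is the assignment keep[i].
def pkeMask (keys : List String) : List Bool × Nat :=
  keys.foldr
    (fun k p =>
      if k == "BACKSPACE" then (false :: p.1, p.2 + 1)
      else if p.2 > 0 then (false :: p.1, p.2 - 1)
      else (true :: p.1, p.2))
    ([], 0)

def process_key_events_alt (events : List (List (String × String))) : String :=
  let keys := events.map (fun e => (PySem.Dict.mk e).getD "key" "")
  let keep := (pkeMask keys).1
  PySem.Str.join "" ((keys.zip keep).filterMap (fun kb => if kb.2 then some kb.1 else none))

-- ===== PRECONDITION & SPEC =====
def Spec_process_key_events (events : List (List (String × String))) (out : String) : Prop := out = process_key_events_alt events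
instance (events : List (List (String × String))) (out : String) : Decidable (Spec_process_key_events events out) := by unfold Spec_process_key_events; infer_instance

-- ===== CLAIM (what is proved, stated in full; the proofs are below) =====
def Claim_equal_process_key_events : Prop := ∀ (events : List (List (String × String))), Dom_process_key_events events → Spec_process_key_events events (process_key_events events)

-- ===== LEMMAS AND PROOFS =====

-- A's step expressed on the key alone
def pkeStepK (text : List String) (key : String) : List String :=
  if key == "BACKSPACE" then
    if text.isEmpty then text else text.dropLast
  else
    text ++ [key]

-- survivors of a key list according to B's mask
def pkeSurv (keys : List String) : List String :=
  (keys.zip (pkeMask keys).1).filterMap (fun kb => if kb.2 then some kb.1 else none)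

-- Invariant: A's stack after folding over `keys` starting from `st` is `st` with the
-- pending backspaces of B's mask removed from its end, followed by B's survivors.
theorem pke_inv (keys : List String) : ∀ (st : List String),
    keys.foldl pkeStepK st =
      st.take (st.length - (pkeMask keys).2) ++ pkeSurv keys := by
  induction keys with
  | nil => intro st; simp [pkeMask, pkeSurv]
  | cons k ks ih =>
      intro st
      rw [List.foldl_cons, ih (pkeStepK st k)]
      have hmask : pkeMask (k :: ks) =
          (if k == "BACKSPACE" then (false :: (pkeMask ks).1, (pkeMask ks).2 + 1)
           else if (pkeMask ks).2 > 0 then (false :: (pkeMask ks).1, (pkeMask ks).2 - 1)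
           else (true :: (pkeMask ks).1, (pkeMask ks).2)) := rfl
      by_cases hk : k = "BACKSPACE"
      · have hm : pkeMask (k :: ks) = (false :: (pkeMask ks).1, (pkeMask ks).2 + 1) := by
          rw [hmask]; simp [hk]
        have hsurv : pkeSurv (k :: ks) = pkeSurv ks := by
          unfold pkeSurv; rw [hm]; simp
        rw [hsurv, hm]
        unfold pkeStepK
        simp only [hk, beq_self_eq_true, if_pos]
        by_cases hst : st.isEmpty
        · have : st = [] := List.isEmpty_iff.mp hst
          simp [this]
        · simp only [hst, Bool.false_eq_true, if_false]
          rw [List.dropLast_eq_take, List.take_take, List.length_take]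
          congr 2
          omega
      · have hk' : (k == "BACKSPACE") = false := by simp [hk]
        by_cases hs : (pkeMask ks).2 > 0
        · have hm : pkeMask (k :: ks) = (false :: (pkeMask ks).1, (pkeMask ks).2 - 1) := by
            rw [hmask]; simp [hk', hs]
          have hsurv : pkeSurv (k :: ks) = pkeSurv ks := by
            unfold pkeSurv; rw [hm]; simp
          rw [hsurv, hm]
          unfold pkeStepK
          simp only [hk', Bool.false_eq_true, if_false]
          rw [List.length_append, List.length_singleton]
          rw [List.take_append_of_le_length (by omega)]
          congr 2
          omega
        · have h0 : (pkeMask ks).2 = 0 := by omega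
          have hm : pkeMask (k :: ks) = (true :: (pkeMask ks).1, (pkeMask ks).2) := by
            rw [hmask]; simp [hk', hs]
          have hsurv : pkeSurv (k :: ks) = k :: pkeSurv ks := by
            unfold pkeSurv; rw [hm]; simp
          rw [hsurv, hm]
          unfold pkeStepK
          simp only [hk', Bool.false_eq_true, if_false, h0, Nat.sub_zero]
          rw [List.take_of_length_le (by simp), List.append_assoc]
          simp

-- ===== VERDICT (by name: the statement is the Claim_ definition above) =====
theorem process_key_events_spec : Claim_equal_process_key_events := by
  intro events _
  unfold Spec_process_key_events process_key_events process_key_events_alt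
  have hfold : events.foldl pkeStepA [] =
      (events.map (fun e => (PySem.Dict.mk e).getD "key" "")).foldl pkeStepK [] := by
    rw [List.foldl_map]
    rfl
  rw [hfold, pke_inv]
  simp [pkeSurv]
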